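-- pv_equiv track=rewrite | github.com/Chen12358/Test-time | test/data_analysis_code/analyze_inference_results.py | get_types_num
-- ===== SOURCE A (Python) =====
-- def get_types_num(declarations):
--     num_lemmas = 0
--     num_axioms = 0
--     for k ,v in declarations.items():
--         if v['type'] == 'lemma':
--             num_lemmas += 1
--         elif v['type'] == 'axiom':
--             num_axioms += 1
--     return num_lemmas, num_axioms
-- ===== SOURCE B (Python) =====
-- def get_types_num(declarations):
--     types = [v['type'] for v in declarations.values()]
--     return types.count('lemma'), types.count('axiom')
-- ===== Notes on version B (the rewrite author's own statement) =====
-- stated objective: idiomatic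
-- what changed: Replaces the single branching counter loop with staged passes: first materialize the list of all type values, then answer each count with a separate list.count scan (no per-element branching, no accumulators).
import Mathlib
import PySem

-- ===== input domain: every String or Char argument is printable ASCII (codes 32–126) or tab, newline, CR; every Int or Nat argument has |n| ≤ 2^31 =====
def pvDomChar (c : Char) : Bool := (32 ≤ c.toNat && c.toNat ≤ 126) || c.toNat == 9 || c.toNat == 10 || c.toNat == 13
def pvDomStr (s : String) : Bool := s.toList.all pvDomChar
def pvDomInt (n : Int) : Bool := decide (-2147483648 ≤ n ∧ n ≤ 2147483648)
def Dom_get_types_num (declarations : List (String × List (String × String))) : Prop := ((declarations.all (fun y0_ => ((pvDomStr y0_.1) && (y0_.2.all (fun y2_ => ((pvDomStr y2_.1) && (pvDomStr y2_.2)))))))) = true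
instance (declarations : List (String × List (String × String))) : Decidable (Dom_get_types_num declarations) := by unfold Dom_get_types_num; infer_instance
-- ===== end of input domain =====

-- B replaces A's branching counter loop with staged passes: build the list of type
-- values once, then answer each count with a separate list.count scan (idiomatic; same cost).

-- ===== PORT A =====
def get_types_num (declarations : List (String × List (String × String))) : Int × Int :=
  declarations.foldl
    (fun (acc : Int × Int) kv =>
      let t := ((PySem.Dict.mk kv.2).get? "type").getD ""
      if t = "lemma" then (acc.1 + 1, acc.2)
      else if t = "axiom" then (acc.1, acc.2 + 1)
      else acc)
    (0, 0)

-- ===== PORT B =====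
def get_types_num_alt (declarations : List (String × List (String × String))) : Int × Int :=
  let types := declarations.map (fun kv => ((PySem.Dict.mk kv.2).get? "type").getD "")
  ((PySem.List.count types "lemma" : Int), (PySem.List.count types "axiom" : Int))

-- ===== PRECONDITION & SPEC =====
-- Pre_ excludes exactly the inputs where some value dict lacks the key "type", on which Python A raises KeyError.
def Pre_get_types_num (declarations : List (String × List (String × String))) : Prop :=
  ∀ kv ∈ declarations, (PySem.Dict.mk kv.2).contains "type" = true
instance (declarations : List (String × List (String × String))) : Decidable (Pre_get_types_num declarations) := by unfold Pre_get_types_num; infer_instance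
def pvWitness_get_types_num : (List (String × List (String × String))) :=
  [("l1", [("type", "lemma")]), ("a1", [("type", "axiom")]), ("d1", [("type", "def")])]

def Spec_get_types_num (declarations : List (String × List (String × String))) (out : Int × Int) : Prop := out = get_types_num_alt declarations
instance (declarations : List (String × List (String × String))) (out : Int × Int) : Decidable (Spec_get_types_num declarations out) := by unfold Spec_get_types_num; infer_instance

-- ===== CLAIM (what is proved, stated in full; the proofs are below) =====
def Claim_equal_get_types_num : Prop := ∀ (declarations : List (String × List (String × String))), Dom_get_types_num declarations → Pre_get_types_num declarations → Spec_get_types_num declarations (get_types_num declarations)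

-- ===== LEMMAS AND PROOFS =====

-- A's fold counts the "lemma" and "axiom" occurrences among the type values.
theorem getTypesNumA_counts (declarations : List (String × List (String × String)))
    (l a : Int) :
    declarations.foldl
      (fun (acc : Int × Int) kv =>
        let t := ((PySem.Dict.mk kv.2).get? "type").getD ""
        if t = "lemma" then (acc.1 + 1, acc.2)
        else if t = "axiom" then (acc.1, acc.2 + 1)
        else acc)
      (l, a)
    = (l + ((declarations.map (fun kv => ((PySem.Dict.mk kv.2).get? "type").getD "")).count "lemma" : Int),
       a + ((declarations.map (fun kv => ((PySem.Dict.mk kv.2).get? "type").getD "")).count "axiom" : Int)) := by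
  induction declarations generalizing l a with
  | nil => simp
  | cons kv rest ih =>
    simp only [List.foldl_cons, List.map_cons]
    by_cases h1 : ((PySem.Dict.mk kv.2).get? "type").getD "" = "lemma"
    · simp [h1, ih]
      ring
    · by_cases h2 : ((PySem.Dict.mk kv.2).get? "type").getD "" = "axiom"
      · simp [h2, ih]
        ring
      · simp [h1, h2, ih]

-- ===== VERDICT (by name: the statement is the Claim_ definition above) =====
theorem get_types_num_spec : Claim_equal_get_types_num := by
  intro declarations _ _
  show get_types_num declarations = get_types_num_alt declarations
  unfold get_types_num get_types_num_alt
  rw [getTypesNumA_counts]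
  simp [PySem.List.count]
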